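-- pv_equiv track=rewrite | github.com/HigashikataZhangsuke/IsoFaaS | BaselineMX/KNative_prototype/run-all.py | EnforceActivityWindow
-- ===== SOURCE A (Python) =====
-- def EnforceActivityWindow(start_time, end_time, instance_events):
--     event_times = [e for e in instance_events if (e > start_time) and (e < end_time)]
--     events_iit = []
--     try:
--         events_iit = [event_times[0]] + [event_times[i] - event_times[i - 1]
--                                          for i in range(1, len(event_times))]
--     except IndexError:
--         pass
--     return events_iit
-- ===== SOURCE B (Python) =====
-- def EnforceActivityWindow(start_time, end_time, instance_events):
--     out = []
--     prev = None
--     for e in instance_events: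
--         if start_time < e < end_time:
--             out.append(e if prev is None else e - prev)
--             prev = e
--     return out
-- ===== Notes on version B (the rewrite author's own statement) =====
-- stated objective: simpler
-- what changed: Single pass with a running `prev` accumulator replaces the filter comprehension plus the index-based difference comprehension guarded by try/except IndexError.
import Mathlib
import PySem

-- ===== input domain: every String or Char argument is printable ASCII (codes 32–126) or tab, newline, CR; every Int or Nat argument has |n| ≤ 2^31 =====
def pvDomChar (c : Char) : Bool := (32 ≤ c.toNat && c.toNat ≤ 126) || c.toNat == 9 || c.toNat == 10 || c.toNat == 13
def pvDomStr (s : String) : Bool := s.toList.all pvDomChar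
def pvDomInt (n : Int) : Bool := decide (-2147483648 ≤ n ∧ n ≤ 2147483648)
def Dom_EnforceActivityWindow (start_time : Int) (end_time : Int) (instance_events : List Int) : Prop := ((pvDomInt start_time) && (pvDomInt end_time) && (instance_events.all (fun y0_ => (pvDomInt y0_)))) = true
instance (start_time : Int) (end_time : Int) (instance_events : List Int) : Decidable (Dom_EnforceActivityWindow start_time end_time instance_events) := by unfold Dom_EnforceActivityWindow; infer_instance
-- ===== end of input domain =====

-- B changes the decomposition: one loop with a running `prev` instead of A's filter
-- comprehension plus an index-based difference comprehension guarded by try/except.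

-- ===== PORT A =====
-- A: filter into event_times, then [et[0]] + [et[i]-et[i-1] for i in range(1,len(et))];
-- the try/except IndexError (only et[0] can raise, exactly when et = []) is the match on et.
def EnforceActivityWindow (start_time : Int) (end_time : Int) (instance_events : List Int) : List Int :=
  let event_times := instance_events.filter (fun e => decide (e > start_time) && decide (e < end_time))
  match event_times with
  | [] => []
  | h :: _ =>
      h :: (PySem.List.pyRange 1 (event_times.length : Int) 1).map
            (fun i => PySem.List.pyGetD event_times i 0 - PySem.List.pyGetD event_times (i - 1) 0)

-- ===== PORT B =====
-- B's loop: prev = None initially; keep e when start_time < e < end_time, appending e for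
-- the first kept event and e - prev afterwards.
def pvAltGo (start_time : Int) (end_time : Int) (prev : Option Int) : List Int → List Int
  | [] => []
  | e :: rest =>
      if start_time < e ∧ e < end_time then
        (match prev with | none => e | some p => e - p) :: pvAltGo start_time end_time (some e) rest
      else
        pvAltGo start_time end_time prev rest

def EnforceActivityWindow_alt (start_time : Int) (end_time : Int) (instance_events : List Int) : List Int :=
  pvAltGo start_time end_time none instance_events

-- ===== PRECONDITION & SPEC =====
def Spec_EnforceActivityWindow (start_time : Int) (end_time : Int) (instance_events : List Int) (out : List Int) : Prop := out = EnforceActivityWindow_alt start_time end_time instance_events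
instance (start_time : Int) (end_time : Int) (instance_events : List Int) (out : List Int) : Decidable (Spec_EnforceActivityWindow start_time end_time instance_events out) := by unfold Spec_EnforceActivityWindow; infer_instance

-- ===== CLAIM (what is proved, stated in full; the proofs are below) =====
def Claim_equal_EnforceActivityWindow : Prop := ∀ (start_time : Int) (end_time : Int) (instance_events : List Int), Dom_EnforceActivityWindow start_time end_time instance_events → Spec_EnforceActivityWindow start_time end_time instance_events (EnforceActivityWindow start_time end_time instance_events)

-- ===== LEMMAS AND PROOFS =====

-- successive-difference form of the filtered list, the common reference shape
def pvDiffs (prev : Option Int) : List Int → List Int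
  | [] => []
  | e :: rest => (match prev with | none => e | some p => e - p) :: pvDiffs (some e) rest

lemma pvAltGo_eq_diffs_filter (s t : Int) (prev : Option Int) (l : List Int) :
    pvAltGo s t prev l = pvDiffs prev (l.filter (fun e => decide (e > s) && decide (e < t))) := by
  induction l generalizing prev with
  | nil => rfl
  | cons x xs ih =>
      by_cases h : s < x ∧ x < t
      · simp [pvAltGo, h, pvDiffs, ih]
      · have hx : ¬ (decide (x > s) && decide (x < t)) = true := by
          simpa [gt_iff_lt] using h
        simp [pvAltGo, h, hx, ih]

lemma pv_map_range_diffs (t : List Int) : ∀ (p : Int),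
    (List.range t.length).map (fun k => (p :: t).getD (k + 1) 0 - (p :: t).getD k 0)
      = pvDiffs (some p) t := by
  induction t with
  | nil => intro p; rfl
  | cons q ys ih =>
      intro p
      simp only [List.length_cons, List.range_succ_eq_map, List.map_cons, List.map_map]
      simpa [pvDiffs, Function.comp] using ih q

lemma pv_index_map_eq_diffs (p : Int) (t : List Int) :
    (PySem.List.pyRange 1 ((p :: t).length : Int) 1).map
        (fun i => PySem.List.pyGetD (p :: t) i 0 - PySem.List.pyGetD (p :: t) (i - 1) 0)
      = pvDiffs (some p) t := by
  rw [PySem.List.pyRange_one, List.map_map]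
  have hlen : (((p :: t).length : Int) - 1).toNat = t.length := by
    simp
  rw [hlen]
  rw [← pv_map_range_diffs t p]
  apply List.map_congr_left
  intro k _
  have h1 : (1 : Int) + (k : Int) = ((k + 1 : Nat) : Int) := by push_cast; ring
  have h2 : ((k + 1 : Nat) : Int) - 1 = ((k : Nat) : Int) := by push_cast; ring
  simp only [Function.comp, h1, h2, PySem.List.pyGetD_natCast]

-- ===== VERDICT (by name: the statement is the Claim_ definition above) =====
theorem EnforceActivityWindow_spec : Claim_equal_EnforceActivityWindow := by
  intro s t l _
  show EnforceActivityWindow s t l = EnforceActivityWindow_alt s t l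
  unfold EnforceActivityWindow EnforceActivityWindow_alt
  rw [pvAltGo_eq_diffs_filter]
  cases h : l.filter (fun e => decide (e > s) && decide (e < t)) with
  | nil => rfl
  | cons p rest =>
      simp only [pvDiffs]
      exact congrArg (p :: ·) (pv_index_map_eq_diffs p rest)
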